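-- pv_equiv track=rewrite | github.com/EsosaOrumwese/fraud-detection-system | src/fraud_detection/label_store/writer_boundary.py | _render_sql
-- ===== SOURCE A (Python) =====
-- def _render_sql(sql: str, backend: str) -> str:
--     rendered = sql
--     if backend == "postgres":
--         for idx in range(1, 31):
--             rendered = rendered.replace(f"{{p{idx}}}", f"${idx}")
--     else:
--         for idx in range(1, 31):
--             rendered = rendered.replace(f"{{p{idx}}}", "?")
--     return rendered
-- ===== SOURCE B (Python) =====
-- def _render_sql(sql: str, backend: str) -> str:
--     # One left-to-right pass: parse "{p<digits>}" tokens and substitute via a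
--     # placeholder table, instead of 30 whole-string replace scans.
--     if backend == "postgres":
--         table = {"{p%d}" % i: "$%d" % i for i in range(1, 31)}
--     else:
--         table = {"{p%d}" % i: "?" for i in range(1, 31)}
--     out = []
--     i = 0
--     n = len(sql)
--     while i < n:
--         if sql[i] == "{" and i + 1 < n and sql[i + 1] == "p":
--             k = i + 2
--             while k < n and sql[k].isdigit():
--                 k += 1
--             if k > i + 2 and k < n and sql[k] == "}":
--                 tok = sql[i:k + 1]
--                 rep = table.get(tok)
--                 if rep is not None:
--                     out.append(rep)
--                     i = k + 1
--                     continue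
--         out.append(sql[i])
--         i += 1
--     return "".join(out)
-- ===== Notes on version B (the rewrite author's own statement) =====
-- stated objective: alternative
-- what changed: Replaces 30 sequential whole-string str.replace passes by one left-to-right scan that parses each '{p<digits>}' token once and substitutes it via a precomputed placeholder table.
import Mathlib
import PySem

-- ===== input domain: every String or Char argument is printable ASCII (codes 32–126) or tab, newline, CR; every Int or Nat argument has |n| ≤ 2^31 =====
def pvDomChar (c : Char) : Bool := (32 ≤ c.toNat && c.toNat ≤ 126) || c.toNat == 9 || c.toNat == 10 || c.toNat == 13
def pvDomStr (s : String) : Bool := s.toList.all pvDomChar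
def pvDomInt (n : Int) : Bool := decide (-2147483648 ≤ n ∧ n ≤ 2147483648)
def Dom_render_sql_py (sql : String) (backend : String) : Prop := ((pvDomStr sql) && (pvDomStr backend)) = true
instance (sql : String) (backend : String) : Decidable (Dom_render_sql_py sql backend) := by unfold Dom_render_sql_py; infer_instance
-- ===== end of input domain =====

-- B substitutes the '{p1}'..'{p30}' placeholders in one left-to-right scan with a
-- placeholder table, instead of A's 30 sequential whole-string replace passes
-- (same return value; alternative algorithm, no speed claim).

-- ===== PORT A =====
def render_sql_py (sql : String) (backend : String) : String :=
  if backend == "postgres" then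
    (PySem.List.pyRange 1 31 1).foldl
      (fun rendered idx =>
        PySem.Str.replace rendered ("{p" ++ PySem.Int.toStr idx ++ "}") ("$" ++ PySem.Int.toStr idx)) sql
  else
    (PySem.List.pyRange 1 31 1).foldl
      (fun rendered idx =>
        PySem.Str.replace rendered ("{p" ++ PySem.Int.toStr idx ++ "}") "?") sql

-- ===== PORT B =====
-- the placeholder table (Source B's `table` dict)
def pvTable (backend : String) : PySem.Dict String String :=
  if backend == "postgres" then
    (PySem.List.pyRange 1 31 1).foldl
      (fun d i => d.insert ("{p" ++ PySem.Int.toStr i ++ "}") ("$" ++ PySem.Int.toStr i))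
      PySem.Dict.empty
  else
    (PySem.List.pyRange 1 31 1).foldl
      (fun d i => d.insert ("{p" ++ PySem.Int.toStr i ++ "}") "?")
      PySem.Dict.empty

-- Source B's while-loop: one pass over the characters; at '{p' parse a digit run and
-- a closing '}', look the token up in the table, else emit the character.
def pvScan (table : PySem.Dict String String) : List Char → List Char
  | [] => []
  | c :: cs =>
    if c = '{' ∧ cs.head? = some 'p' then
      match hdw : cs.tail.dropWhile (fun ch => PySem.Chars.isdigit ch) with
      | '}' :: tl =>
        if cs.tail.takeWhile (fun ch => PySem.Chars.isdigit ch) ≠ [] then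
          match table.get? (String.ofList
              ('{' :: 'p' :: (cs.tail.takeWhile (fun ch => PySem.Chars.isdigit ch) ++ ['}']))) with
          | some rep => rep.toList ++ pvScan table tl
          | none => c :: pvScan table cs
        else c :: pvScan table cs
      | _ => c :: pvScan table cs
    else c :: pvScan table cs
termination_by l => l.length
decreasing_by
  · have h1 : tl.length < (List.dropWhile (fun ch => PySem.Chars.isdigit ch) cs.tail).length := by
      rw [hdw]; simp
    have h2 := List.length_dropWhile_le (fun ch => PySem.Chars.isdigit ch) cs.tail
    have h3 : cs.tail.length ≤ cs.length := by cases cs <;> simp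
    simp only [List.length_cons]
    omega
  all_goals simp

def render_sql_py_alt (sql : String) (backend : String) : String :=
  String.ofList (pvScan (pvTable backend) sql.toList)

-- ===== PRECONDITION & SPEC =====
def Spec_render_sql_py (sql : String) (backend : String) (out : String) : Prop := out = render_sql_py_alt sql backend
instance (sql : String) (backend : String) (out : String) : Decidable (Spec_render_sql_py sql backend out) := by unfold Spec_render_sql_py; infer_instance

-- ===== CLAIM (what is proved, stated in full; the proofs are below) =====
def Claim_equal_render_sql_py : Prop := ∀ (sql : String) (backend : String), Dom_render_sql_py sql backend → Spec_render_sql_py sql backend (render_sql_py sql backend)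

-- ===== LEMMAS AND PROOFS =====

-- clean recursion computing Python's str.replace (for old ≠ [])
def pvRep (old new : List Char) : List Char → List Char
  | [] => []
  | c :: cs =>
    if old.isPrefixOf (c :: cs) then new ++ pvRep old new (cs.drop (old.length - 1))
    else c :: pvRep old new cs
termination_by l => l.length
decreasing_by
  · simp [List.length_drop]
  · simp

-- simultaneous one-pass replacement over a pair list (proof-side reference scanner)
def pvSim (ps : List (List Char × List Char)) : List Char → List Char
  | [] => []
  | c :: cs =>
    match ps.find? (fun p => p.1.isPrefixOf (c :: cs)) with
    | some p => p.2 ++ pvSim ps (cs.drop (p.1.length - 1))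
    | none => c :: pvSim ps cs
termination_by l => l.length
decreasing_by
  · simp [List.length_drop]
  · simp

def pvMulti (ps : List (List Char × List Char)) (s : List Char) : List Char :=
  ps.foldl (fun s p => pvRep p.1 p.2 s) s

-- shape of a (token, replacement) pair: '{p<digits>}' / replacement starts '$' or '?'
def pvTokOK (p : List Char × List Char) : Bool :=
  (match p.1 with
   | '{' :: 'p' :: rest =>
     decide (rest.takeWhile (fun ch => PySem.Chars.isdigit ch) ≠ []) &&
     (rest.dropWhile (fun ch => PySem.Chars.isdigit ch) == ['}'])
   | _ => false) &&
  (p.2.all (fun ch => decide (ch ≠ '{'))) &&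
  (match p.2.head? with | some '$' => true | some '?' => true | _ => false)

theorem pvTokOK_shape {p : List Char × List Char} (h : pvTokOK p = true) :
    ∃ ds, ds ≠ [] ∧ (∀ d ∈ ds, PySem.Chars.isdigit d = true) ∧ p.1 = '{' :: 'p' :: (ds ++ ['}']) := by
  unfold pvTokOK at h
  simp only [Bool.and_eq_true] at h
  obtain ⟨⟨h1, _⟩, _⟩ := h
  split at h1
  · rename_i rest heq
    simp only [Bool.and_eq_true, decide_eq_true_eq, beq_iff_eq] at h1
    obtain ⟨hne, hdrop⟩ := h1
    refine ⟨rest.takeWhile (fun ch => PySem.Chars.isdigit ch), hne, ?_, ?_⟩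
    · intro d hd; exact List.mem_takeWhile_imp hd
    · rw [heq]
      have : rest.takeWhile (fun ch => PySem.Chars.isdigit ch) ++ ['}'] = rest := by
        conv_rhs => rw [← List.takeWhile_append_dropWhile (p := fun ch => PySem.Chars.isdigit ch) (l := rest)]
        rw [hdrop]
      rw [this]
  · exact absurd h1 (by simp)

theorem pvTokOK_rep {p : List Char × List Char} (h : pvTokOK p = true) :
    (∀ ch ∈ p.2, ch ≠ '{') ∧ (p.2.head? = some '$' ∨ p.2.head? = some '?') := by
  unfold pvTokOK at h
  simp only [Bool.and_eq_true] at h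
  obtain ⟨⟨_, h2⟩, h3⟩ := h
  constructor
  · intro ch hch
    have := List.all_eq_true.mp h2 ch hch
    simpa using this
  · split at h3
    all_goals simp_all

-- characters of a token tail are never '{', '$' or '?'
theorem pvDigit_facts {d : Char} (h : PySem.Chars.isdigit d = true) :
    d ≠ '{' ∧ d ≠ '$' ∧ d ≠ '?' := by
  refine ⟨?_, ?_, ?_⟩ <;> rintro rfl <;> exact absurd h (by decide)

-- ## pvRep structural lemmas
theorem pvRep_skip {old : List Char} (new : List Char) {c : Char} {cs : List Char}
    (h : old.isPrefixOf (c :: cs) = false) :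
    pvRep old new (c :: cs) = c :: pvRep old new cs := by
  rw [pvRep, if_neg (by simp [h])]

-- ## PySem.Chars.replace = pvRep
theorem pvGo_eq (old new : List Char) (hold : old ≠ []) :
    ∀ fuel l acc, l.length ≤ fuel →
      PySem.Chars.replace.go old new fuel l acc = acc.reverse ++ pvRep old new l := by
  intro fuel
  induction fuel with
  | zero =>
    intro l acc hl
    have : l = [] := by cases l <;> simp_all
    subst this
    simp [PySem.Chars.replace.go, pvRep]
  | succ fuel ih =>
    intro l acc hl
    cases l with
    | nil => simp [PySem.Chars.replace.go, pvRep]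
    | cons c t =>
      rw [PySem.Chars.replace.go]
      by_cases hpre : old.isPrefixOf (c :: t) = true
      · rw [if_pos hpre]
        obtain ⟨o, os, rfl⟩ : ∃ o os, old = o :: os := by
          cases old with
          | nil => exact absurd rfl hold
          | cons o os => exact ⟨o, os, rfl⟩
        have hdrop : List.drop (o :: os).length (c :: t) = List.drop ((o :: os).length - 1) t := by
          simp
        rw [hdrop, ih _ _ (by simp only [List.length_drop]; simp only [List.length_cons] at hl; omega)]
        rw [pvRep, if_pos (by simp [hpre])]
        simp
      · rw [if_neg hpre]
        rw [ih _ _ (by simp at hl ⊢; omega)]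
        rw [pvRep_skip new (by rw [Bool.eq_false_iff]; exact hpre)]
        simp

theorem pvReplace_eq (s old new : List Char) (hold : old ≠ []) :
    PySem.Chars.replace s old new = pvRep old new s := by
  unfold PySem.Chars.replace
  rw [if_neg (by simpa using hold)]
  rw [pvGo_eq old new hold s.length s [] le_rfl]
  simp

-- ## pvRep structural lemmas
theorem pvRep_hit (o : Char) (os new rest : List Char) :
    pvRep (o :: os) new ((o :: os) ++ rest) = new ++ pvRep (o :: os) new rest := by
  have hpre : (o :: os).isPrefixOf (o :: (os ++ rest)) = true := by
    simp [List.isPrefixOf_iff_prefix]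
  rw [List.cons_append, pvRep, if_pos (by simp [hpre])]
  congr 1
  have : (o :: os).length - 1 = os.length := by simp
  rw [this, List.drop_left]

theorem pvRep_append_noBrace {old : List Char} (new : List Char) {a : List Char} (b : List Char)
    (ha : ∀ ch ∈ a, ch ≠ '{') (hold : old.head? = some '{') :
    pvRep old new (a ++ b) = a ++ pvRep old new b := by
  induction a with
  | nil => simp
  | cons c a' ih =>
    obtain ⟨os, rfl⟩ : ∃ os, old = '{' :: os := by
      cases old with
      | nil => simp at hold
      | cons o os => simp at hold; exact ⟨os, by rw [hold]⟩
    have hc : c ≠ '{' := ha c (by simp)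
    have hpre : ('{' :: os).isPrefixOf (c :: (a' ++ b)) = false := by
      rw [Bool.eq_false_iff]
      intro hcon
      rw [List.isPrefixOf_iff_prefix] at hcon
      exact hc ((List.cons_prefix_cons.mp hcon).1).symm
    rw [List.cons_append, pvRep_skip new hpre, ih (fun ch hch => ha ch (by simp [hch]))]
    simp

-- prefixes free of '$'/'?' survive a replacement backwards
theorem pvRep_prefix_transport {old new : List Char}
    (hnew : new.head? = some '$' ∨ new.head? = some '?') :
    ∀ u q, (∀ ch ∈ q, ch ≠ '$' ∧ ch ≠ '?') → q <+: pvRep old new u → q <+: u := by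
  intro u
  induction u with
  | nil => intro q hq hq'; simpa [pvRep] using hq'
  | cons c cs ih =>
    intro q hq hq'
    by_cases hpre : old.isPrefixOf (c :: cs) = true
    · rw [pvRep, if_pos (by simp [hpre])] at hq'
      cases q with
      | nil => exact List.nil_prefix
      | cons qh qt =>
        exfalso
        obtain ⟨n0, ns, rfl⟩ : ∃ n0 ns, new = n0 :: ns := by
          rcases hnew with h | h <;>
            (cases new with | nil => simp at h | cons n0 ns => exact ⟨n0, ns, rfl⟩)
        have hqh : qh = n0 := by
          rw [List.cons_append] at hq'
          exact (List.cons_prefix_cons.mp hq').1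
        have h2 := hq qh (by simp)
        rcases hnew with h | h <;> simp only [List.head?_cons, Option.some.injEq] at h <;>
          simp [hqh, h] at h2
    · rw [pvRep_skip new (by rw [Bool.eq_false_iff]; exact hpre)] at hq'
      cases q with
      | nil => exact List.nil_prefix
      | cons qh qt =>
        obtain ⟨rfl, hq2⟩ := List.cons_prefix_cons.mp hq'
        exact List.cons_prefix_cons.mpr
          ⟨rfl, ih qt (fun ch hch => hq ch (by simp [hch])) hq2⟩

-- ## pvMulti structural lemmas
theorem pvMulti_cons_def (p : List Char × List Char) (ps : List (List Char × List Char)) (s : List Char) :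
    pvMulti (p :: ps) s = pvMulti ps (pvRep p.1 p.2 s) := rfl

-- the character classes appearing in a token tail avoid '$', '?' and '{'
theorem pvTokTail_clean {ds : List Char} (hds : ∀ d ∈ ds, PySem.Chars.isdigit d = true) :
    ∀ ch ∈ ('p' :: (ds ++ ['}'])), ch ≠ '$' ∧ ch ≠ '?' := by
  intro ch hch
  simp only [List.mem_cons, List.mem_append, List.mem_singleton] at hch
  rcases hch with rfl | hch | rfl | h
  · exact ⟨by decide, by decide⟩
  · have := pvDigit_facts (hds ch hch)
    exact ⟨this.2.1, this.2.2⟩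
  · exact ⟨by decide, by decide⟩
  · simp at h

theorem pvTokTail_noBrace {ds : List Char} (hds : ∀ d ∈ ds, PySem.Chars.isdigit d = true) :
    ∀ ch ∈ ('p' :: (ds ++ ['}'])), ch ≠ '{' := by
  intro ch hch
  simp only [List.mem_cons, List.mem_append, List.mem_singleton] at hch
  rcases hch with rfl | hch | rfl | h
  · decide
  · exact (pvDigit_facts (hds ch hch)).1
  · decide
  · simp at h

theorem pvMulti_nil (ps : List (List Char × List Char)) : pvMulti ps [] = [] := by
  induction ps with
  | nil => rfl
  | cons p ps ih => simpa [pvMulti, pvRep] using ih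

theorem pvMulti_cons_of_no_prefix {ps : List (List Char × List Char)}
    (H1 : ∀ p ∈ ps, pvTokOK p = true) {c : Char} :
    ∀ cs, (∀ p ∈ ps, p.1.isPrefixOf (c :: cs) = false) →
      pvMulti ps (c :: cs) = c :: pvMulti ps cs := by
  induction ps with
  | nil => intro cs _; rfl
  | cons p ps' ih =>
    intro cs h
    have hp : p.1.isPrefixOf (c :: cs) = false := h p (by simp)
    rw [pvMulti_cons_def, pvRep_skip p.2 hp]
    have H1' : ∀ q ∈ ps', pvTokOK q = true := fun q hq => H1 q (by simp [hq])
    rw [ih H1' _ ?_, ← pvMulti_cons_def]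
    intro q hq
    rw [Bool.eq_false_iff]
    intro hcon
    rw [List.isPrefixOf_iff_prefix] at hcon
    obtain ⟨ds, hne, hds, hshape⟩ := pvTokOK_shape (H1 q (by simp [hq]))
    rw [hshape] at hcon
    obtain ⟨rfl, htail⟩ := List.cons_prefix_cons.mp hcon
    have hrep := pvTokOK_rep (H1 p (by simp))
    have htail' : ('p' :: (ds ++ ['}'])) <+: cs :=
      pvRep_prefix_transport hrep.2 cs _ (pvTokTail_clean hds) htail
    have : q.1.isPrefixOf ('{' :: cs) = true := by
      rw [List.isPrefixOf_iff_prefix, hshape]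
      exact List.cons_prefix_cons.mpr ⟨rfl, htail'⟩
    have hfalse := h q (by simp [hq])
    rw [this] at hfalse
    exact Bool.true_eq_false.mp hfalse

theorem pvMulti_append_noBrace {ps : List (List Char × List Char)}
    (H1 : ∀ p ∈ ps, pvTokOK p = true) {a : List Char}
    (ha : ∀ ch ∈ a, ch ≠ '{') :
    ∀ b, pvMulti ps (a ++ b) = a ++ pvMulti ps b := by
  induction ps with
  | nil => intro b; rfl
  | cons p ps' ih =>
    intro b
    obtain ⟨ds, hne, hds, hshape⟩ := pvTokOK_shape (H1 p (by simp))
    have hold : p.1.head? = some '{' := by rw [hshape]; rfl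
    rw [pvMulti_cons_def, pvRep_append_noBrace p.2 b ha hold,
      ih (fun q hq => H1 q (by simp [hq])) (pvRep p.1 p.2 b), ← pvMulti_cons_def]

-- a fixed token prefix is carried through replacements that can never match it
theorem pvMulti_block {L : List (List Char × List Char)}
    (H1 : ∀ p ∈ L, pvTokOK p = true)
    {tail : List Char} (htail : ∀ ch ∈ tail, ch ≠ '{')
    (hnp : ∀ q ∈ L, ∀ v, ¬ q.1 <+: (('{' :: tail) ++ v)) :
    ∀ u, pvMulti L (('{' :: tail) ++ u) = ('{' :: tail) ++ pvMulti L u := by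
  induction L with
  | nil => intro u; rfl
  | cons q L' ih =>
    intro u
    have hq1 : q.1.isPrefixOf ('{' :: (tail ++ u)) = false := by
      rw [Bool.eq_false_iff]
      intro hcon
      rw [List.isPrefixOf_iff_prefix] at hcon
      exact hnp q (by simp) u (by simpa using hcon)
    obtain ⟨ds, hne, hds, hshape⟩ := pvTokOK_shape (H1 q (by simp))
    have hold : q.1.head? = some '{' := by rw [hshape]; rfl
    have hstep : pvRep q.1 q.2 (('{' :: tail) ++ u) = ('{' :: tail) ++ pvRep q.1 q.2 u := by
      show pvRep q.1 q.2 ('{' :: (tail ++ u)) = _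
      rw [pvRep_skip q.2 hq1, pvRep_append_noBrace q.2 u htail hold]
      rfl
    rw [pvMulti_cons_def, hstep,
      ih (fun p hp => H1 p (by simp [hp])) (fun p hp v => hnp p (by simp [hp]) v) (pvRep q.1 q.2 u),
      ← pvMulti_cons_def]

-- ## main: sequential = simultaneous
theorem pvMulti_eq_pvSim {ps : List (List Char × List Char)}
    (H1 : ∀ p ∈ ps, pvTokOK p = true)
    (H2 : ∀ p ∈ ps, ∀ q ∈ ps, p.1 <+: q.1 → p = q)
    (H3 : ps.Nodup) :
    ∀ s, pvMulti ps s = pvSim ps s := by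
  suffices h : ∀ n s, s.length ≤ n → pvMulti ps s = pvSim ps s by
    intro s; exact h s.length s le_rfl
  intro n
  induction n with
  | zero =>
    intro s hs
    have : s = [] := by cases s <;> simp_all
    subst this
    rw [pvMulti_nil, pvSim]
  | succ n ihn =>
    intro s hs
    cases s with
    | nil => rw [pvMulti_nil, pvSim]
    | cons c cs =>
      cases hfind : ps.find? (fun p => p.1.isPrefixOf (c :: cs)) with
      | none =>
        have hall : ∀ p ∈ ps, p.1.isPrefixOf (c :: cs) = false := by
          intro p hp
          exact Bool.eq_false_iff.mpr (List.find?_eq_none.mp hfind p hp)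
        rw [pvMulti_cons_of_no_prefix H1 cs hall, pvSim, hfind,
          ihn cs (by simp at hs; omega)]
      | some p =>
        have hp : p ∈ ps := List.mem_of_find?_eq_some hfind
        have hpre0 := List.find?_some hfind
        simp only at hpre0
        have hpre : p.1 <+: (c :: cs) := List.isPrefixOf_iff_prefix.mp hpre0
        obtain ⟨ds, hne, hds, hshape⟩ := pvTokOK_shape (H1 p hp)
        obtain ⟨rest, hrest⟩ := hpre
        obtain ⟨L, Rt, hps⟩ := List.append_of_mem hp
        have hnodup := H3
        rw [hps] at hnodup
        have hpL : p ∉ L := fun hmem =>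
          (List.disjoint_of_nodup_append hnodup) hmem (by simp)
        have hnp : ∀ q ∈ L, ∀ v, ¬ q.1 <+: (p.1 ++ v) := by
          intro q hq v hcon
          have hqps : q ∈ ps := by rw [hps]; simp [hq]
          have hself : p.1 <+: (p.1 ++ v) := List.prefix_append p.1 v
          rcases List.prefix_or_prefix_of_prefix hcon hself with h | h
          · exact hpL (H2 q hqps p hp h ▸ hq)
          · exact hpL ((H2 p hp q hqps h).symm ▸ hq)
        have htail : ∀ ch ∈ ('p' :: (ds ++ ['}'])), ch ≠ '{' := pvTokTail_noBrace hds
        have hrep := pvTokOK_rep (H1 p hp)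
        have hrest_len : rest.length ≤ n := by
          have := congrArg List.length hrest
          simp [hshape] at this ⊢
          simp at hs
          omega
        calc pvMulti ps (c :: cs)
            = pvMulti Rt (pvRep p.1 p.2 (pvMulti L (p.1 ++ rest))) := by
              rw [← hrest, hps]; simp [pvMulti, List.foldl_append]
          _ = pvMulti Rt (pvRep p.1 p.2 (p.1 ++ pvMulti L rest)) := by
              rw [hshape] at hnp ⊢
              rw [pvMulti_block (fun q hq => H1 q (by rw [hps]; simp [hq])) htail hnp]
          _ = pvMulti Rt (p.2 ++ pvRep p.1 p.2 (pvMulti L rest)) := by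
              rw [hshape, pvRep_hit]
          _ = p.2 ++ pvMulti Rt (pvRep p.1 p.2 (pvMulti L rest)) := by
              rw [pvMulti_append_noBrace (fun q hq => H1 q (by rw [hps]; simp [hq])) hrep.1]
          _ = p.2 ++ pvMulti ps rest := by
              rw [hps]; simp [pvMulti, List.foldl_append]
          _ = p.2 ++ pvSim ps rest := by rw [ihn rest hrest_len]
          _ = pvSim ps (c :: cs) := by
              rw [pvSim, hfind]
              congr 1
              have hrest' := hrest
              rw [hshape, List.cons_append] at hrest'
              have hcs : cs = ('p' :: (ds ++ ['}'])) ++ rest :=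
                ((List.cons_eq_cons.mp hrest').2).symm
              have hlen : p.1.length - 1 = ('p' :: (ds ++ ['}'])).length := by
                rw [hshape]; simp
              rw [hcs, hlen, List.drop_left]

-- take/drop of an all-sat block followed by a failing character
theorem pvTakeWhile_exact {p : Char → Bool} {ds : List Char} (hds : ∀ d ∈ ds, p d = true)
    {c : Char} (hc : p c = false) (tl : List Char) :
    (ds ++ c :: tl).takeWhile p = ds ∧ (ds ++ c :: tl).dropWhile p = c :: tl := by
  induction ds with
  | nil => simp [List.takeWhile_cons, List.dropWhile_cons, hc]
  | cons d ds' ih =>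
    have hd : p d = true := hds d (by simp)
    have := ih (fun d hd => hds d (by simp [hd]))
    simp [List.takeWhile_cons, List.dropWhile_cons, hd, this.1, this.2]

-- ## port B = pvSim
theorem pvScan_eq_pvSim (table : PySem.Dict String String)
    (ps : List (List Char × List Char))
    (hitems : table.items.map (fun p => (p.1.toList, p.2.toList)) = ps)
    (hnd : table.keys.Nodup)
    (H1 : ∀ p ∈ ps, pvTokOK p = true)
    (H2 : ∀ p ∈ ps, ∀ q ∈ ps, p.1 <+: q.1 → p = q) :
    ∀ cs, pvScan table cs = pvSim ps cs := by
  suffices h : ∀ n cs, cs.length ≤ n → pvScan table cs = pvSim ps cs by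
    intro cs; exact h cs.length cs le_rfl
  intro n
  induction n with
  | zero =>
    intro cs hcs
    have : cs = [] := by cases cs <;> simp_all
    subst this
    rw [pvScan, pvSim]
  | succ n ihn =>
    intro cs hcs
    cases cs with
    | nil => rw [pvScan, pvSim]
    | cons c cs' =>
      cases hfind : ps.find? (fun p => p.1.isPrefixOf (c :: cs')) with
      | some p =>
        have hp : p ∈ ps := List.mem_of_find?_eq_some hfind
        have hpre0 := List.find?_some hfind
        simp only at hpre0
        have hpre : p.1 <+: (c :: cs') := List.isPrefixOf_iff_prefix.mp hpre0
        obtain ⟨ds, hne, hds, hshape⟩ := pvTokOK_shape (H1 p hp)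
        obtain ⟨tl, htl⟩ := hpre
        rw [hshape, List.cons_append, List.cons_append, List.append_assoc,
          List.singleton_append] at htl
        obtain ⟨rfl, hcs'⟩ := List.cons_eq_cons.mp htl
        subst hcs'
        -- now the input is '{' :: 'p' :: (ds ++ '}' :: tl)
        have hsplit := pvTakeWhile_exact (p := fun ch => PySem.Chars.isdigit ch) (c := '}') hds (by decide) tl
        rw [← hitems] at hp
        obtain ⟨a, ha, hap⟩ := List.mem_map.mp hp
        have hget : table.get? a.1 = some a.2 :=
          PySem.Dict.get?_of_mem_items table (by cases a; exact ha) hnd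
        rw [pvScan, if_pos ⟨rfl, rfl⟩, pvSim, hfind]
        split
        · rename_i tl2 heq
          rw [List.tail_cons, hsplit.2] at heq
          obtain ⟨rfl⟩ : tl = tl2 := (List.cons_eq_cons.mp heq).2
          rw [List.tail_cons, hsplit.1, if_pos hne]
          have htok : String.ofList ('{' :: 'p' :: (ds ++ ['}'])) = a.1 := by
            rw [← hshape, ← congrArg Prod.fst hap, String.ofList_toList]
          rw [htok, hget]
          have ha2 : a.2.toList = p.2 := congrArg Prod.snd hap
          have hdrop : ('p' :: (ds ++ '}' :: tl)).drop (p.1.length - 1) = tl := by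
            have h1 : ('p' :: (ds ++ '}' :: tl)) = ('p' :: (ds ++ ['}'])) ++ tl := by simp
            have h2 : p.1.length - 1 = ('p' :: (ds ++ ['}'])).length := by rw [hshape]; simp
            rw [h1, h2, List.drop_left]
          simp only [ha2, hdrop]
          congr 1
          exact ihn tl (by simp at hcs; omega)
        · rename_i hne2
          exfalso
          exact hne2 _ (by rw [List.tail_cons, hsplit.2])
      | none =>
        rw [pvSim, hfind]
        rw [pvScan]
        by_cases hc1 : c = '{' ∧ cs'.head? = some 'p'
        · rw [if_pos hc1]
          split
          · rename_i tl2 heq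
            by_cases hds : cs'.tail.takeWhile (fun ch => PySem.Chars.isdigit ch) ≠ []
            · rw [if_pos hds]
              cases hget : table.get? (String.ofList
                  ('{' :: 'p' :: (cs'.tail.takeWhile (fun ch => PySem.Chars.isdigit ch) ++ ['}']))) with
              | some rep =>
                exfalso
                have hmem := PySem.Dict.mem_items_of_get?_eq_some table hget
                have hpair : (('{' :: 'p' :: (cs'.tail.takeWhile (fun ch => PySem.Chars.isdigit ch) ++ ['}'])),
                    rep.toList) ∈ ps := by
                  rw [← hitems]
                  have := List.mem_map_of_mem (f := fun p => (p.1.toList, p.2.toList)) hmem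
                  simpa using this
                have hnone := List.find?_eq_none.mp hfind _ hpair
                apply hnone
                simp only
                rw [List.isPrefixOf_iff_prefix]
                obtain ⟨rfl, hhd⟩ := hc1
                obtain ⟨u, rfl⟩ : ∃ u, cs' = 'p' :: u := by
                  cases cs' with
                  | nil => simp at hhd
                  | cons x u => simp at hhd; exact ⟨u, by rw [hhd]⟩
                refine List.cons_prefix_cons.mpr ⟨rfl, List.cons_prefix_cons.mpr ⟨rfl, ?_⟩⟩
                rw [List.tail_cons] at heq ⊢
                conv_rhs => rw [← List.takeWhile_append_dropWhile
                  (p := fun ch => PySem.Chars.isdigit ch) (l := u)]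
                rw [heq]
                have : u.takeWhile (fun ch => PySem.Chars.isdigit ch) ++ '}' :: tl2
                    = (u.takeWhile (fun ch => PySem.Chars.isdigit ch) ++ ['}']) ++ tl2 := by simp
                rw [this]
                exact List.prefix_append _ _
              | none => rw [ihn cs' (by simp at hcs; omega)]
            · rw [if_neg hds, ihn cs' (by simp at hcs; omega)]
          · rw [ihn cs' (by simp at hcs; omega)]
        · rw [if_neg hc1, ihn cs' (by simp at hcs; omega)]

-- ## port A = pvMulti
theorem pvFold_eq_pvMulti (tok rep : Int → String)
    (htok : ∀ i : Int, (tok i).toList ≠ []) :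
    ∀ (idxs : List Int) (s : String),
      (idxs.foldl (fun r i => PySem.Str.replace r (tok i) (rep i)) s).toList
        = pvMulti (idxs.map fun i => ((tok i).toList, (rep i).toList)) s.toList := by
  intro idxs
  induction idxs with
  | nil => intro s; rfl
  | cons i idxs' ih =>
    intro s
    rw [List.map_cons, List.foldl_cons, pvMulti_cons_def, ih (PySem.Str.replace s (tok i) (rep i))]
    congr 1
    rw [PySem.Str.toList_replace, pvReplace_eq _ _ _ (htok i)]

-- nonemptiness of the tokens
theorem pvTokNe (a : String) : ("{p" ++ a ++ "}").toList ≠ [] := by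
  intro h
  have := congrArg List.length h
  simp [String.toList_append] at this

-- the two concrete (table, pair-list) instantiations and their checked facts
def pvTPG : PySem.Dict String String :=
  (PySem.List.pyRange 1 31 1).foldl
    (fun d i => d.insert ("{p" ++ PySem.Int.toStr i ++ "}") ("$" ++ PySem.Int.toStr i))
    PySem.Dict.empty

def pvTQ : PySem.Dict String String :=
  (PySem.List.pyRange 1 31 1).foldl
    (fun d i => d.insert ("{p" ++ PySem.Int.toStr i ++ "}") "?")
    PySem.Dict.empty

def pvPairsPG : List (List Char × List Char) :=
  (PySem.List.pyRange 1 31 1).map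
    (fun i => (("{p" ++ PySem.Int.toStr i ++ "}").toList, ("$" ++ PySem.Int.toStr i).toList))

def pvPairsQ : List (List Char × List Char) :=
  (PySem.List.pyRange 1 31 1).map
    (fun i => (("{p" ++ PySem.Int.toStr i ++ "}").toList, ("?" : String).toList))

theorem pvItemsPG : pvTPG.items.map (fun p => (p.1.toList, p.2.toList)) = pvPairsPG := by decide
theorem pvItemsQ : pvTQ.items.map (fun p => (p.1.toList, p.2.toList)) = pvPairsQ := by decide
theorem pvNdPG : pvTPG.keys.Nodup := by decide
theorem pvNdQ : pvTQ.keys.Nodup := by decide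
theorem pvH1PG : ∀ p ∈ pvPairsPG, pvTokOK p = true := by decide
theorem pvH1Q : ∀ p ∈ pvPairsQ, pvTokOK p = true := by decide
theorem pvH2PG : ∀ p ∈ pvPairsPG, ∀ q ∈ pvPairsPG, p.1 <+: q.1 → p = q := by decide
theorem pvH2Q : ∀ p ∈ pvPairsQ, ∀ q ∈ pvPairsQ, p.1 <+: q.1 → p = q := by decide
theorem pvH3PG : pvPairsPG.Nodup := by decide
theorem pvH3Q : pvPairsQ.Nodup := by decide

-- ===== VERDICT (by name: the statement is the Claim_ definition above) =====
theorem render_sql_py_spec : Claim_equal_render_sql_py := by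
  intro sql backend _
  unfold Spec_render_sql_py render_sql_py render_sql_py_alt pvTable
  rw [← String.toList_inj]
  by_cases hb : (backend == "postgres") = true
  · rw [if_pos hb, if_pos hb]
    rw [pvFold_eq_pvMulti _ _ (fun i => pvTokNe (PySem.Int.toStr i)) _ sql,
      String.toList_ofList]
    show pvMulti pvPairsPG sql.toList = pvScan pvTPG sql.toList
    rw [pvScan_eq_pvSim pvTPG pvPairsPG pvItemsPG pvNdPG pvH1PG pvH2PG,
      pvMulti_eq_pvSim pvH1PG pvH2PG pvH3PG]
  · rw [if_neg hb, if_neg hb]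
    rw [pvFold_eq_pvMulti _ _ (fun i => pvTokNe (PySem.Int.toStr i)) _ sql,
      String.toList_ofList]
    show pvMulti pvPairsQ sql.toList = (String.ofList (pvScan pvTQ sql.toList)).toList
    rw [String.toList_ofList]
    rw [pvScan_eq_pvSim pvTQ pvPairsQ pvItemsQ pvNdQ pvH1Q pvH2Q,
      pvMulti_eq_pvSim pvH1Q pvH2Q pvH3Q]
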